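-- pv_equiv track=rewrite | github.com/johnoneil/arib | arib/drcs_decoder.py | bitmap_to_ass_path
-- ===== SOURCE A (Python) =====
-- def bitmap_to_ass_path(bitmap, alpha_threshold=1):
--     """
--     bitmap: 2D list [h][w] with values 0..N (N = 2**depth-1)
--     alpha_threshold: draw pixels with value >= threshold (simple mono)
--     returns: ASS path string like 'm x y l x2 y l x2 y2 l x y2'
--     """
--     h = len(bitmap)
--     if h == 0:
--         return ""
--     w = len(bitmap[0])
--
--     path_parts = []
--     for y in range(h):
--         row = bitmap[y]
--         x = 0
--         while x < w:
--             # find start of a run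
--             while x < w and row[x] < alpha_threshold:
--                 x += 1
--             if x >= w:
--                 break
--             run_start = x
--             while x < w and row[x] >= alpha_threshold:
--                 x += 1
--             run_end = x  # exclusive
--
--             # rectangle from (run_start, y) to (run_end, y+1)
--             # ASS path is integer-friendly; y grows downward in libass
--             x1, y1 = run_start, y
--             x2, y2 = run_end, y + 1
--             path_parts.append(f"m {x1} {y1} l {x2} {y1} l {x2} {y2} l {x1} {y2}")
--
--     return " ".join(path_parts)
-- ===== SOURCE B (Python) =====
-- def bitmap_to_ass_path(bitmap, alpha_threshold=1):
--     if len(bitmap) == 0: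
--         return ""
--     w = len(bitmap[0])
--     parts = []
--     for y in range(len(bitmap)):
--         # stage 1: binarize the row; stage 2: detect run boundaries by comparing
--         # the padded mask with itself shifted; stage 3: pair rising with falling edges
--         mask = [v >= alpha_threshold for v in bitmap[y][:w]]
--         padded = [False] + mask + [False]
--         starts = [x for x in range(w) if padded[x + 1] and not padded[x]]
--         ends = [x + 1 for x in range(w) if padded[x + 1] and not padded[x + 2]]
--         for x1, x2 in zip(starts, ends):
--             parts.append(f"m {x1} {y} l {x2} {y} l {x2} {y + 1} l {x1} {y + 1}")
--     return " ".join(parts)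
-- ===== Notes on version B (the rewrite author's own statement) =====
-- stated objective: alternative
-- what changed: Instead of A's stateful nested while-loop scan that chases run boundaries with a moving index, B works in independent stages per row: binarize the row into a mask, detect all rising edges (run starts) and all falling edges (run ends) by comparing the False-padded mask against its shifts, then zip the two edge lists to get the rectangles.
import Mathlib
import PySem

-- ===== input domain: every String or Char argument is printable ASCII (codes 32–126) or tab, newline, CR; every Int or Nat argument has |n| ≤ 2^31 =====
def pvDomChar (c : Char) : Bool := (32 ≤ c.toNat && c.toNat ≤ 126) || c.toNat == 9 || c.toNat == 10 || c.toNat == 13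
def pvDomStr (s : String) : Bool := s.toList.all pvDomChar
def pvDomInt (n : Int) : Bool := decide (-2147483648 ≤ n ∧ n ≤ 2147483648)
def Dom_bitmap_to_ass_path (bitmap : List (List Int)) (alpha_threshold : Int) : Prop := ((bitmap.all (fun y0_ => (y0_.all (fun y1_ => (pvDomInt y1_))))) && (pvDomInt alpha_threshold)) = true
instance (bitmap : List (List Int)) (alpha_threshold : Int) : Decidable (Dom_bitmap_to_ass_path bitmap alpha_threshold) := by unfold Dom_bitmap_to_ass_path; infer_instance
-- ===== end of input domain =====

-- B replaces A's stateful index-chasing run scan by independent staged passes per row: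
-- binarize into a mask, detect rising/falling edges against the padded shifted mask,
-- and zip the two edge lists (objective: alternative, no speed claim).

-- ===== PORT A =====
-- the f-string rectangle "m x1 y1 l x2 y1 l x2 y2 l x1 y2" (shared formatting helper; both
-- Pythons build the identical string); built with PySem.Str.join so it is kernel-evaluable
def pvRect (x1 : Int) (y1 : Int) (x2 : Int) : String :=
  PySem.Str.join " "
    ["m", PySem.Int.toStr x1, PySem.Int.toStr y1, "l", PySem.Int.toStr x2, PySem.Int.toStr y1,
     "l", PySem.Int.toStr x2, PySem.Int.toStr (y1 + 1), "l", PySem.Int.toStr x1,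
     PySem.Int.toStr (y1 + 1)]

-- row[x] as A reads it (inside Pre_ the index is always in range, so getD 0 never fires)
def pvVal (row : List Int) (x : Nat) : Int := (PySem.List.pyGet? row (x : Int)).getD 0

-- 'while x < w and p(row[x]): x += 1' (used for both inner while loops of A); the structural
-- fuel w - x is exactly the number of remaining loop iterations, so pvScan is the while loop
def pvScanAux (row : List Int) (p : Int → Bool) (w : Nat) : Nat → Nat → Nat
  | 0, x => x
  | fuel + 1, x => if x < w then (if p (pvVal row x) then pvScanAux row p w fuel (x + 1) else x) else x

def pvScan (row : List Int) (p : Int → Bool) (w x : Nat) : Nat :=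
  pvScanAux row p w (w - x) x

-- A's outer 'while x < w' loop for one row; run_start = pvScan (<t), run_end = pvScan (≥t);
-- each iteration advances x by at least 1, so the structural fuel w - x suffices exactly
def pvRowAux (row : List Int) (t : Int) (w : Nat) (y : Int) : Nat → Nat → List String → List String
  | 0, _, acc => acc
  | fuel + 1, x, acc =>
    if x < w then
      if pvScan row (fun v => decide (v < t)) w x < w then
        pvRowAux row t w y fuel
          (pvScan row (fun v => decide (t ≤ v)) w (pvScan row (fun v => decide (v < t)) w x))
          (acc ++ [pvRect ((pvScan row (fun v => decide (v < t)) w x : Nat) : Int) y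
            ((pvScan row (fun v => decide (t ≤ v)) w (pvScan row (fun v => decide (v < t)) w x : Nat) : Nat) : Int)])
      else acc
    else acc

def pvRow (row : List Int) (t : Int) (w : Nat) (y : Int) (x : Nat) (acc : List String) : List String :=
  pvRowAux row t w y (w - x) x acc

def bitmap_to_ass_path (bitmap : List (List Int)) (alpha_threshold : Int) : String :=
  if bitmap.length = 0 then ""
  else
    PySem.Str.join " "
      ((PySem.List.enumerate bitmap).foldl
        (fun acc yr =>
          pvRow yr.2 alpha_threshold ((PySem.List.pyGet? bitmap (0 : Int)).getD []).length yr.1 0 acc) [])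

-- ===== PORT B =====
-- Source B per row: mask = [v >= t for v in row[:w]]; padded = [False] + mask + [False];
-- starts = rising edges, ends = falling edges, zip them into rectangles.
-- padded[i] is ported as List.getD: inside Pre_ every Source B index into padded is in range
-- (the row has at least w entries), so getD is exact there.
def bitmap_to_ass_path_alt (bitmap : List (List Int)) (alpha_threshold : Int) : String :=
  if bitmap.length = 0 then ""
  else
    let w := ((PySem.List.pyGet? bitmap (0 : Int)).getD []).length
    PySem.Str.join " "
      ((PySem.List.enumerate bitmap).foldl
        (fun acc yr =>
          let mask := (PySem.List.slice yr.2 none (some (w : Int))).map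
            (fun v => decide (alpha_threshold ≤ v))
          let padded := [false] ++ mask ++ [false]
          let starts := (List.range w).filter
            (fun x => padded.getD (x + 1) false && !(padded.getD x false))
          let ends := ((List.range w).filter
            (fun x => padded.getD (x + 1) false && !(padded.getD (x + 2) false))).map
              (fun x => x + 1)
          (starts.zip ends).foldl
            (fun a p => a ++ [pvRect ((p.1 : Nat) : Int) yr.1 ((p.2 : Nat) : Int)]) acc) [])

-- ===== PRECONDITION & SPEC =====
-- Pre_ excludes exactly the inputs on which A raises IndexError: a non-empty bitmap with some
-- row shorter than the first row (A reads every index < len(bitmap[0]) of every row).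
def Pre_bitmap_to_ass_path (bitmap : List (List Int)) (alpha_threshold : Int) : Prop :=
  ∀ row ∈ bitmap, (bitmap.headD []).length ≤ row.length
instance (bitmap : List (List Int)) (alpha_threshold : Int) : Decidable (Pre_bitmap_to_ass_path bitmap alpha_threshold) := by unfold Pre_bitmap_to_ass_path; infer_instance

def pvWitness_bitmap_to_ass_path : List (List Int) × Int := ([[0, 2, 2, 0], [3, 0, 1, 1]], 1)

def Spec_bitmap_to_ass_path (bitmap : List (List Int)) (alpha_threshold : Int) (out : String) : Prop := out = bitmap_to_ass_path_alt bitmap alpha_threshold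
instance (bitmap : List (List Int)) (alpha_threshold : Int) (out : String) : Decidable (Spec_bitmap_to_ass_path bitmap alpha_threshold out) := by unfold Spec_bitmap_to_ass_path; infer_instance

-- ===== CLAIM (what is proved, stated in full; the proofs are below) =====
def Claim_equal_bitmap_to_ass_path : Prop := ∀ (bitmap : List (List Int)) (alpha_threshold : Int), Dom_bitmap_to_ass_path bitmap alpha_threshold → Pre_bitmap_to_ass_path bitmap alpha_threshold → Spec_bitmap_to_ass_path bitmap alpha_threshold (bitmap_to_ass_path bitmap alpha_threshold)

-- ===== LEMMAS AND PROOFS =====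

-- ---- common vocabulary: runs of a boolean mask, as (start, exclusive end) pairs ----

def pvShift (k : Nat) (l : List (Nat × Nat)) : List (Nat × Nat) :=
  l.map (fun p => (p.1 + k, p.2 + k))

def pvRunsB : List Bool → List (Nat × Nat)
  | [] => []
  | false :: m => pvShift 1 (pvRunsB m)
  | true :: m =>
      (0, 1 + (m.takeWhile id).length) ::
        pvShift (1 + (m.takeWhile id).length) (pvRunsB (m.dropWhile id))
termination_by m => m.length
decreasing_by
  · simp
  · have := (List.dropWhile_sublist (p := id) (l := m)).length_le
    simp; omega

theorem pvShift_zero (l : List (Nat × Nat)) : pvShift 0 l = l := by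
  simp [pvShift]

theorem pvShift_shift (a b : Nat) (l : List (Nat × Nat)) :
    pvShift a (pvShift b l) = pvShift (b + a) l := by
  unfold pvShift
  rw [List.map_map]
  congr 1
  funext p
  simp [Function.comp]
  omega

def pvRects (y : Int) (x : Nat) (rs : List (Nat × Nat)) : List String :=
  rs.map (fun p => pvRect ((x + p.1 : Nat) : Int) y ((x + p.2 : Nat) : Int))

theorem pvRects_shift (y : Int) (x k : Nat) (l : List (Nat × Nat)) :
    pvRects y x (pvShift k l) = pvRects y (x + k) l := by
  unfold pvRects pvShift
  rw [List.map_map]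
  refine List.map_congr_left ?_
  intro p _
  have h1 : x + (p.1 + k) = x + k + p.1 := by omega
  have h2 : x + (p.2 + k) = x + k + p.2 := by omega
  simp only [Function.comp_apply]
  rw [h1, h2]

theorem pvRects_cons (y : Int) (a s e : Nat) (l : List (Nat × Nat)) :
    pvRects y a ((s, e) :: l) = pvRect ((a + s : Nat) : Int) y ((a + e : Nat) : Int) :: pvRects y a l := by
  simp [pvRects]

-- ---- A-side: the scan loops ----

theorem pvScan_pos (row : List Int) (p : Int → Bool) (w x : Nat)
    (hx : x < w) (hp : p (pvVal row x) = true) :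
    pvScan row p w x = pvScan row p w (x + 1) := by
  unfold pvScan
  have h1 : w - x = (w - (x + 1)) + 1 := by omega
  rw [h1, pvScanAux]
  simp [hx, hp]

theorem pvScan_neg (row : List Int) (p : Int → Bool) (w x : Nat)
    (h : ¬ (x < w) ∨ p (pvVal row x) = false) : pvScan row p w x = x := by
  unfold pvScan
  rcases h with h | h
  · have h1 : w - x = 0 := by omega
    rw [h1, pvScanAux]
  · cases h2 : w - x with
    | zero => rw [pvScanAux]
    | succ fuel => rw [pvScanAux]; simp [h]

theorem pvScan_le (row : List Int) (p : Int → Bool) (w x : Nat) : x ≤ pvScan row p w x := by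
  by_cases hx : x < w
  · by_cases hp : p (pvVal row x) = true
    · rw [pvScan_pos row p w x hx hp]
      have := pvScan_le row p w (x + 1)
      omega
    · rw [pvScan_neg row p w x (Or.inr (by simpa using hp))]
  · rw [pvScan_neg row p w x (Or.inl hx)]
termination_by w - x

theorem pvScan_succ_le (row : List Int) (p : Int → Bool) (w x : Nat)
    (hx : x < w) (hp : p (pvVal row x) = true) : x + 1 ≤ pvScan row p w x := by
  rw [pvScan_pos row p w x hx hp]; exact pvScan_le row p w (x + 1)

theorem pvScan_stop (row : List Int) (p : Int → Bool) (w x : Nat)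
    (h : pvScan row p w x < w) : p (pvVal row (pvScan row p w x)) = false := by
  by_cases hx : x < w
  · by_cases hp : p (pvVal row x) = true
    · rw [pvScan_pos row p w x hx hp] at h ⊢
      exact pvScan_stop row p w (x + 1) h
    · rw [pvScan_neg row p w x (Or.inr (by simpa using hp))]
      simpa using hp
  · rw [pvScan_neg row p w x (Or.inl hx)] at h
    omega
termination_by w - x

theorem pv_takeWhile_len_le {α : Type} (p : α → Bool) (l : List α) :
    (l.takeWhile p).length ≤ l.length :=
  (List.takeWhile_sublist p).length_le

theorem pv_dropWhile_eq_drop {α : Type} (p : α → Bool) (l : List α) :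
    l.dropWhile p = l.drop (l.takeWhile p).length := by
  induction l with
  | nil => simp
  | cons a l ih => by_cases h : p a <;> simp [List.takeWhile_cons, List.dropWhile_cons, h, ih]

-- the segment of row that A still has to look at from position x
def pvSeg (row : List Int) (w x : Nat) : List Int := (row.drop x).take (w - x)

def pvMaskSeg (t : Int) (row : List Int) (w x : Nat) : List Bool :=
  (pvSeg row w x).map (fun v => decide (t ≤ v))

theorem pvSeg_length (row : List Int) (w x : Nat) (hw : w ≤ row.length) :
    (pvSeg row w x).length = w - x := by
  unfold pvSeg
  rw [List.length_take, List.length_drop]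
  omega

theorem pvSeg_cons (row : List Int) (w x : Nat) (hw : w ≤ row.length) (hx : x < w) :
    pvSeg row w x = pvVal row x :: pvSeg row w (x + 1) := by
  have hxl : x < row.length := by omega
  have h1 : row.drop x = row[x] :: row.drop (x + 1) := (List.getElem_cons_drop hxl).symm
  have h2 : pvVal row x = row[x] := by
    simp [pvVal, List.getElem?_eq_getElem hxl]
  have h3 : w - x = (w - (x + 1)) + 1 := by omega
  unfold pvSeg
  rw [h2, h1, h3, List.take_succ_cons]

theorem pvSeg_drop (row : List Int) (w x k : Nat) :
    pvSeg row w (x + k) = (pvSeg row w x).drop k := by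
  simp only [pvSeg, List.drop_take, List.drop_drop]
  have h2 : w - x - k = w - (x + k) := by omega
  rw [h2]

theorem pvScan_eq (row : List Int) (p : Int → Bool) (w : Nat) (hw : w ≤ row.length)
    (x : Nat) (hx : x ≤ w) :
    pvScan row p w x = x + ((pvSeg row w x).takeWhile p).length := by
  by_cases hlt : x < w
  · rw [pvSeg_cons row w x hw hlt, List.takeWhile_cons]
    by_cases hp : p (pvVal row x) = true
    · rw [pvScan_pos row p w x hlt hp]
      simp only [hp, if_true, List.length_cons]
      rw [pvScan_eq row p w hw (x + 1) (by omega)]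
      omega
    · rw [pvScan_neg row p w x (Or.inr (by simpa using hp))]
      simp only [Bool.not_eq_true] at hp
      simp [hp]
  · rw [pvScan_neg row p w x (Or.inl hlt)]
    have h0 : w - x = 0 := by omega
    simp [pvSeg, h0]
termination_by w - x

-- !(t ≤ v) is (v < t)
theorem pv_not_comp (t : Int) :
    ((fun b => !b) ∘ (fun v => decide (t ≤ v))) = (fun v => decide (v < t)) := by
  funext v
  by_cases h : t ≤ v <;> simp [Function.comp, h] <;> omega

theorem pvRunsB_lowdrop (m : List Bool) :
    pvRunsB m =
      pvShift ((m.takeWhile (fun b => !b)).length) (pvRunsB (m.dropWhile (fun b => !b))) := by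
  induction m with
  | nil => simp [pvRunsB, pvShift]
  | cons b m ih =>
    cases b with
    | true => simp [List.takeWhile_cons, List.dropWhile_cons, pvShift_zero]
    | false =>
      rw [pvRunsB, ih, pvShift_shift]
      simp [List.takeWhile_cons, List.dropWhile_cons]

-- one step of A's outer loop, phrased through the runs of the remaining mask
theorem pvStep (row : List Int) (t : Int) (w : Nat) (y : Int) (x : Nat)
    (hw : w ≤ row.length) (hx : x < w) :
    pvRects y x (pvRunsB (pvMaskSeg t row w x)) =
      (if pvScan row (fun v => decide (v < t)) w x < w then
        pvRect ((pvScan row (fun v => decide (v < t)) w x : Nat) : Int) y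
            ((pvScan row (fun v => decide (t ≤ v)) w (pvScan row (fun v => decide (v < t)) w x) : Nat) : Int) ::
          pvRects y (pvScan row (fun v => decide (t ≤ v)) w (pvScan row (fun v => decide (v < t)) w x))
            (pvRunsB (pvMaskSeg t row w
              (pvScan row (fun v => decide (t ≤ v)) w (pvScan row (fun v => decide (v < t)) w x))))
      else []) := by
  have hscan := pvScan_eq row (fun v => decide (v < t)) w hw x (by omega)
  set kLow := ((pvSeg row w x).takeWhile (fun v => decide (v < t))).length with hk
  have hkle : kLow ≤ w - x := by
    have := pv_takeWhile_len_le (fun v => decide (v < t)) (pvSeg row w x)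
    rw [pvSeg_length row w x hw] at this
    omega
  have hmask_take :
      ((pvMaskSeg t row w x).takeWhile (fun b => !b)).length = kLow := by
    unfold pvMaskSeg
    rw [List.takeWhile_map, pv_not_comp, List.length_map]
  have hmask_drop :
      (pvMaskSeg t row w x).dropWhile (fun b => !b) = pvMaskSeg t row w (x + kLow) := by
    unfold pvMaskSeg
    rw [List.dropWhile_map, pv_not_comp, pv_dropWhile_eq_drop, ← hk, pvSeg_drop]
  have hlow := pvRunsB_lowdrop (pvMaskSeg t row w x)
  rw [hmask_take, hmask_drop] at hlow
  by_cases hs1 : pvScan row (fun v => decide (v < t)) w x < w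
  · rw [if_pos hs1]
    have hs1x : pvScan row (fun v => decide (v < t)) w x = x + kLow := hscan
    rw [hs1x] at hs1 ⊢
    -- the mask at s1 starts with a true
    have hstop := pvScan_stop row (fun v => decide (v < t)) w x (by omega)
    rw [hs1x] at hstop
    have hval : decide (t ≤ pvVal row (x + kLow)) = true := by
      simp only [decide_eq_false_iff_not, not_lt] at hstop
      simpa using hstop
    have hsegc := pvSeg_cons row w (x + kLow) hw hs1
    have hmaskc : pvMaskSeg t row w (x + kLow) =
        true :: pvMaskSeg t row w (x + kLow + 1) := by
      unfold pvMaskSeg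
      rw [hsegc, List.map_cons, hval]
    set j := ((pvSeg row w (x + kLow + 1)).takeWhile (fun v => decide (t ≤ v))).length with hj
    have hid : (id ∘ fun v => decide (t ≤ v)) = (fun v => decide (t ≤ v)) := by
      funext v; simp
    have hmask_take2 :
        ((pvMaskSeg t row w (x + kLow + 1)).takeWhile id).length = j := by
      unfold pvMaskSeg
      rw [List.takeWhile_map, List.length_map, hid, hj]
    have hmask_drop2 :
        (pvMaskSeg t row w (x + kLow + 1)).dropWhile id = pvMaskSeg t row w (x + kLow + 1 + j) := by
      unfold pvMaskSeg
      rw [List.dropWhile_map, hid, pv_dropWhile_eq_drop, ← hj,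
        pvSeg_drop row w (x + kLow + 1) j]
    have hs2 : pvScan row (fun v => decide (t ≤ v)) w (x + kLow) = x + kLow + 1 + j := by
      rw [pvScan_eq row (fun v => decide (t ≤ v)) w hw (x + kLow) (by omega), hsegc,
        List.takeWhile_cons]
      simp only [hval, if_true, List.length_cons]
      omega
    rw [hs2, hlow, pvRects_shift, hmaskc, pvRunsB, hmask_take2, hmask_drop2,
      pvRects_cons, pvRects_shift]
    have e1 : x + kLow + 0 = x + kLow := by omega
    have e2 : x + kLow + (1 + j) = x + kLow + 1 + j := by omega
    rw [e1, e2]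
  · rw [if_neg hs1]
    have hs1x : pvScan row (fun v => decide (v < t)) w x = x + kLow := hscan
    have hkw : kLow = w - x := by omega
    have hempty : pvMaskSeg t row w (x + kLow) = [] := by
      unfold pvMaskSeg
      have : pvSeg row w (x + kLow) = [] := by
        have := pvSeg_length row w (x + kLow) hw
        cases h : pvSeg row w (x + kLow) with
        | nil => rfl
        | cons a l => rw [h] at this; simp at this; omega
      rw [this, List.map_nil]
    rw [hlow, hempty]
    simp [pvRunsB, pvShift, pvRects]

theorem pvRowAux_eq (row : List Int) (t : Int) (w : Nat) (y : Int)
    (hw : w ≤ row.length) (fuel : Nat) :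
    ∀ (x : Nat) (acc : List String), x ≤ w → w - x ≤ fuel →
      pvRowAux row t w y fuel x acc = acc ++ pvRects y x (pvRunsB (pvMaskSeg t row w x)) := by
  induction fuel with
  | zero =>
    intro x acc hx hfuel
    have hxw : x = w := by omega
    subst hxw
    rw [pvRowAux]
    simp [pvMaskSeg, pvSeg, pvRunsB, pvRects]
  | succ fuel ih =>
    intro x acc hx hfuel
    rw [pvRowAux]
    by_cases hlt : x < w
    · rw [if_pos hlt, pvStep row t w y x hw hlt]
      by_cases hx1 : pvScan row (fun v => decide (v < t)) w x < w
      · rw [if_pos hx1, if_pos hx1]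
        have h1 : x ≤ pvScan row (fun v => decide (v < t)) w x :=
          pvScan_le row (fun v => decide (v < t)) w x
        have h2 := pvScan_stop row (fun v => decide (v < t)) w x hx1
        simp only [decide_eq_false_iff_not, not_lt] at h2
        have h3 : pvScan row (fun v => decide (v < t)) w x + 1 ≤
            pvScan row (fun v => decide (t ≤ v)) w (pvScan row (fun v => decide (v < t)) w x) :=
          pvScan_succ_le row (fun v => decide (t ≤ v)) w _ hx1 (by simpa using h2)
        have hx2w : pvScan row (fun v => decide (t ≤ v)) w (pvScan row (fun v => decide (v < t)) w x) ≤ w := by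
          have hs := pvScan_eq row (fun v => decide (t ≤ v)) w hw
            (pvScan row (fun v => decide (v < t)) w x) (by omega)
          have hle := pv_takeWhile_len_le (fun v => decide (t ≤ v))
            (pvSeg row w (pvScan row (fun v => decide (v < t)) w x))
          rw [pvSeg_length row w _ hw] at hle
          omega
        rw [ih _ _ hx2w (by omega)]
        simp
      · rw [if_neg hx1, if_neg hx1]
        simp
    · rw [if_neg hlt]
      have hxw : x = w := by omega
      subst hxw
      simp [pvMaskSeg, pvSeg, pvRunsB, pvRects]

theorem pvRow_eq (row : List Int) (t : Int) (w : Nat) (y : Int)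
    (hw : w ≤ row.length) (acc : List String) :
    pvRow row t w y 0 acc = acc ++ pvRects y 0 (pvRunsB (pvMaskSeg t row w 0)) :=
  pvRowAux_eq row t w y hw (w - 0) 0 acc (by omega) le_rfl

-- ---- B-side: the edge filters of Source B, with the leading pad generalized to 'prev' ----

def pvStarts (prev : Bool) (m : List Bool) : List Nat :=
  (List.range m.length).filter
    (fun x => (prev :: m ++ [false]).getD (x + 1) false && !((prev :: m ++ [false]).getD x false))

def pvEnds (prev : Bool) (m : List Bool) : List Nat :=
  ((List.range m.length).filter
    (fun x => (prev :: m ++ [false]).getD (x + 1) false && !((prev :: m ++ [false]).getD (x + 2) false))).map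
      (fun x => x + 1)

-- the same edge lists, recursively (proof vocabulary)
def pvStartsR (prev : Bool) : List Bool → List Nat
  | [] => []
  | b :: m => (if b && !prev then [0] else []) ++ (pvStartsR b m).map (fun x => x + 1)

def pvEndsR (prev : Bool) : List Bool → List Nat
  | [] => []
  | b :: m => (if b && !(m.headD false) then [1] else []) ++ (pvEndsR b m).map (fun x => x + 1)

theorem pvStarts_eq (m : List Bool) : ∀ prev, pvStarts prev m = pvStartsR prev m := by
  induction m with
  | nil => intro prev; simp [pvStarts, pvStartsR]
  | cons b m ih =>
    intro prev
    unfold pvStarts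
    rw [List.length_cons, List.range_succ_eq_map, List.filter_cons, List.filter_map]
    have hp : ((fun x => (prev :: (b :: m) ++ [false]).getD (x + 1) false &&
          !((prev :: (b :: m) ++ [false]).getD x false)) ∘ Nat.succ)
        = (fun x => (b :: m ++ [false]).getD (x + 1) false && !((b :: m ++ [false]).getD x false)) := by
      funext x
      simp only [Function.comp_apply, Nat.succ_eq_add_one, List.cons_append,
        List.getD_cons_succ]
    have hh : ((prev :: (b :: m) ++ [false]).getD (0 + 1) false &&
        !((prev :: (b :: m) ++ [false]).getD 0 false)) = (b && !prev) := by
      simp [List.getD_cons_succ, List.getD_cons_zero]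
    rw [hp, hh, ← pvStarts, ih b, pvStartsR]
    by_cases h : (b && !prev) = true
    · rw [if_pos h, if_pos h]
      simp [Nat.succ_eq_add_one]
    · rw [if_neg h, if_neg h, List.nil_append]

theorem pvEnds_eq (m : List Bool) : ∀ prev, pvEnds prev m = pvEndsR prev m := by
  induction m with
  | nil => intro prev; simp [pvEnds, pvEndsR]
  | cons b m ih =>
    intro prev
    unfold pvEnds
    rw [List.length_cons, List.range_succ_eq_map, List.filter_cons, List.filter_map]
    have hp : ((fun x => (prev :: (b :: m) ++ [false]).getD (x + 1) false &&
          !((prev :: (b :: m) ++ [false]).getD (x + 2) false)) ∘ Nat.succ)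
        = (fun x => (b :: m ++ [false]).getD (x + 1) false && !((b :: m ++ [false]).getD (x + 2) false)) := by
      funext x
      simp only [Function.comp_apply, Nat.succ_eq_add_one, List.cons_append,
        List.getD_cons_succ]
    have hh : ((prev :: (b :: m) ++ [false]).getD (0 + 1) false &&
        !((prev :: (b :: m) ++ [false]).getD (0 + 2) false)) = (b && !(m.headD false)) := by
      cases m <;> simp [List.getD_cons_succ, List.getD_cons_zero]
    have hfold : ((List.range m.length).filter
          (fun x => (b :: m ++ [false]).getD (x + 1) false &&
            !((b :: m ++ [false]).getD (x + 2) false))).map (fun x => x + 1) = pvEndsR b m := by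
      rw [← ih b]
      rfl
    rw [hp, hh, pvEndsR]
    by_cases h : (b && !(m.headD false)) = true
    · rw [if_pos h, if_pos h, List.map_cons, List.map_map, ← hfold, List.map_map]
      rfl
    · rw [if_neg h, if_neg h, List.nil_append, List.map_map, ← hfold, List.map_map]

theorem pvStartsR_true (m : List Bool) :
    pvStartsR true m =
      (pvStartsR false (m.dropWhile id)).map (fun x => x + (m.takeWhile id).length) := by
  induction m with
  | nil => simp [pvStartsR]
  | cons b m ih =>
    cases b with
    | true =>
      have h1 : pvStartsR true (true :: m) = (pvStartsR true m).map (fun x => x + 1) := by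
        simp [pvStartsR]
      have ht : (true :: m).takeWhile id = true :: m.takeWhile id := by
        simp [List.takeWhile_cons, id]
      have hd : (true :: m).dropWhile id = m.dropWhile id := by
        simp [List.dropWhile_cons, id]
      rw [h1, ih, List.map_map, ht, hd, List.length_cons]
      refine List.map_congr_left ?_
      intro x _
      simp only [Function.comp_apply]
      omega
    | false =>
      have h1 : pvStartsR true (false :: m) = (pvStartsR false m).map (fun x => x + 1) := by
        simp [pvStartsR]
      have h2 : pvStartsR false (false :: m) = (pvStartsR false m).map (fun x => x + 1) := by
        simp [pvStartsR]
      have ht : (false :: m).takeWhile id = [] := by simp [List.takeWhile_cons, id]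
      have hd : (false :: m).dropWhile id = false :: m := by simp [List.dropWhile_cons, id]
      rw [h1, ht, hd, h2]
      simp

-- peel a whole run off the falling-edge list
theorem pvEndsR_run (m : List Bool) :
    (if m.headD false then [] else [1]) ++ (pvEndsR true m).map (fun x => x + 1) =
      (1 + (m.takeWhile id).length) ::
        (pvEndsR false (m.dropWhile id)).map (fun x => x + (1 + (m.takeWhile id).length)) := by
  induction m with
  | nil => simp [pvEndsR]
  | cons b m ih =>
    cases b with
    | false =>
      have h1 : pvEndsR true (false :: m) = (pvEndsR false m).map (fun x => x + 1) := by
        simp [pvEndsR]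
      have h2 : pvEndsR false (false :: m) = (pvEndsR false m).map (fun x => x + 1) := by
        simp [pvEndsR]
      have ht : (false :: m).takeWhile id = [] := by simp [List.takeWhile_cons, id]
      have hd : (false :: m).dropWhile id = false :: m := by simp [List.dropWhile_cons, id]
      rw [ht, hd, h1, h2]
      simp
    | true =>
      have ht : (true :: m).takeWhile id = true :: m.takeWhile id := by
        simp [List.takeWhile_cons, id]
      have hd : (true :: m).dropWhile id = m.dropWhile id := by
        simp [List.dropWhile_cons, id]
      rw [ht, hd, List.length_cons, List.headD_cons, if_pos rfl, List.nil_append, pvEndsR]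
      simp only [Bool.true_and]
      rw [List.map_append, List.map_map]
      have hswap : (if (!(m.headD false)) = true then [1] else ([] : List Nat)) =
          (if m.headD false = true then [] else [1]) := by
        cases m with
        | nil => simp
        | cons a m => cases a <;> simp
      rw [hswap]
      have ihm := congrArg (List.map (fun x => x + 1)) ih
      rw [List.map_append, List.map_cons, List.map_map] at ihm
      rw [ihm, List.map_map]
      congr 1

-- the central fact: zipping rising with falling edges yields exactly the runs
theorem pvZipR (m : List Bool) :
    (pvStartsR false m).zip (pvEndsR false m) = pvRunsB m := by
  match m with
  | [] => simp [pvStartsR, pvEndsR, pvRunsB]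
  | false :: m =>
    have h1 : pvStartsR false (false :: m) = (pvStartsR false m).map (fun x => x + 1) := by
      simp [pvStartsR]
    have h2 : pvEndsR false (false :: m) = (pvEndsR false m).map (fun x => x + 1) := by
      simp [pvEndsR]
    rw [h1, h2, List.zip_map, pvZipR m, pvRunsB]
    unfold pvShift
    refine List.map_congr_left ?_
    intro p _
    rfl
  | true :: m =>
    have h1 : pvStartsR false (true :: m) = 0 :: (pvStartsR true m).map (fun x => x + 1) := by
      simp [pvStartsR]
    have h2 : pvEndsR false (true :: m) =
        (if m.headD false then [] else [1]) ++ (pvEndsR true m).map (fun x => x + 1) := by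
      rw [pvEndsR]
      simp only [Bool.true_and]
      congr 1
      cases m with
      | nil => simp
      | cons a m => cases a <;> simp
    rw [h1, h2, pvEndsR_run, pvStartsR_true, List.map_map]
    have hS : (pvStartsR false (m.dropWhile id)).map
          ((fun x => x + 1) ∘ fun x => x + (m.takeWhile id).length) =
        (pvStartsR false (m.dropWhile id)).map (fun x => x + (1 + (m.takeWhile id).length)) := by
      refine List.map_congr_left ?_
      intro p _
      simp only [Function.comp_apply]
      omega
    rw [hS, List.zip_cons_cons, List.zip_map, pvZipR (m.dropWhile id), pvRunsB]
    unfold pvShift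
    congr 1
termination_by m.length
decreasing_by
  · simp
  · have := (List.dropWhile_sublist (p := id) (l := m)).length_le
    simp
    omega

-- B's inner loop for one row, given that the mask has exactly w entries
theorem pvBrow (mask : List Bool) (w : Nat) (hlen : mask.length = w) (y : Int)
    (acc : List String) :
    (((List.range w).filter
        (fun x => ([false] ++ mask ++ [false]).getD (x + 1) false &&
          !(([false] ++ mask ++ [false]).getD x false))).zip
      (((List.range w).filter
        (fun x => ([false] ++ mask ++ [false]).getD (x + 1) false &&
          !(([false] ++ mask ++ [false]).getD (x + 2) false))).map (fun x => x + 1))).foldl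
      (fun a p => a ++ [pvRect ((p.1 : Nat) : Int) y ((p.2 : Nat) : Int)]) acc =
    acc ++ pvRects y 0 (pvRunsB mask) := by
  subst hlen
  show ((pvStarts false mask).zip (pvEnds false mask)).foldl
      (fun a p => a ++ [pvRect ((p.1 : Nat) : Int) y ((p.2 : Nat) : Int)]) acc = _
  have hmapfn : (pvRunsB mask).map
        (fun p : Nat × Nat => pvRect ((p.1 : Nat) : Int) y ((p.2 : Nat) : Int)) =
      pvRects y 0 (pvRunsB mask) := by
    unfold pvRects
    refine List.map_congr_left ?_
    intro p _
    rw [Nat.zero_add, Nat.zero_add]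
  rw [pvStarts_eq, pvEnds_eq, pvZipR, PySem.List.foldl_append_singleton_eq_map, hmapfn]

-- ===== VERDICT (by name: the statement is the Claim_ definition above) =====
theorem bitmap_to_ass_path_spec : Claim_equal_bitmap_to_ass_path := by
  intro bitmap t _hDom hPre
  unfold Spec_bitmap_to_ass_path
  cases bitmap with
  | nil => rfl
  | cons r0 rest =>
    unfold bitmap_to_ass_path bitmap_to_ass_path_alt
    simp only [List.length_cons]
    rw [if_neg (Nat.succ_ne_zero rest.length), if_neg (Nat.succ_ne_zero rest.length)]
    have hw0 : ((PySem.List.pyGet? (r0 :: rest) (0 : Int)).getD []).length = r0.length := by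
      simp
    rw [hw0]
    congr 1
    apply PySem.List.foldl_congr_mem
    intro acc yr hmem
    have hrow : yr.2 ∈ (r0 :: rest) := by
      rcases (PySem.List.mem_enumerate_iff _ _ _).1 hmem with ⟨k, hk, rfl⟩
      simp
    have hwle : r0.length ≤ yr.2.length := by
      have := hPre yr.2 hrow
      simpa using this
    -- A's row
    rw [pvRow_eq yr.2 t r0.length yr.1 hwle acc]
    -- B's row: name the mask and rewrite the filters as pvStarts/pvEnds
    have hslice : PySem.List.slice yr.2 none (some ((r0.length : Nat) : Int)) =
        yr.2.take r0.length := by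
      rw [PySem.List.slice_to_natCast]
    have hmask : (PySem.List.slice yr.2 none (some ((r0.length : Nat) : Int))).map
          (fun v => decide (t ≤ v)) = pvMaskSeg t yr.2 r0.length 0 := by
      rw [hslice]
      unfold pvMaskSeg pvSeg
      rw [Nat.sub_zero, List.drop_zero]
    have hlen : (pvMaskSeg t yr.2 r0.length 0).length = r0.length := by
      unfold pvMaskSeg
      rw [List.length_map, pvSeg_length yr.2 r0.length 0 hwle]
      omega
    rw [hmask]
    exact (pvBrow (pvMaskSeg t yr.2 r0.length 0) r0.length hlen yr.1 acc).symm
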